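-- pv_equiv track=rewrite | github.com/sourabh-git123/python_learning | Core_Python/A_Ud_100_D/Day 1 - Beginning/example2.py | solv
-- ===== SOURCE A (Python) =====
-- def solv(A):
--     ele_len = len(A)
--     for i in range(0, ele_len - 1):
--         for j in range(i + 1, ele_len - 1):
--             if A[i] == A[j]:
--                 return A[i]
--     else:
--         return -1
--
-- A = [10, 5, 3, 4, 3, 6, 9, 10]
-- ===== SOURCE B (Python) =====
-- def solv(A):
--     body = A[:-1]
--     counts = {}
--     for x in body:
--         counts[x] = counts.get(x, 0) + 1
--     for x in body:
--         if counts[x] > 1: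
--             return x
--     return -1
-- ===== Notes on version B (the rewrite author's own statement) =====
-- stated objective: alternative
-- what changed: Replaced the quadratic nested index scan with one dict-building pass counting occurrences of A[:-1] and a single linear scan returning the first element whose count exceeds 1; A's early exit can still win on inputs with early duplicates, so no speed is claimed.
import Mathlib
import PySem

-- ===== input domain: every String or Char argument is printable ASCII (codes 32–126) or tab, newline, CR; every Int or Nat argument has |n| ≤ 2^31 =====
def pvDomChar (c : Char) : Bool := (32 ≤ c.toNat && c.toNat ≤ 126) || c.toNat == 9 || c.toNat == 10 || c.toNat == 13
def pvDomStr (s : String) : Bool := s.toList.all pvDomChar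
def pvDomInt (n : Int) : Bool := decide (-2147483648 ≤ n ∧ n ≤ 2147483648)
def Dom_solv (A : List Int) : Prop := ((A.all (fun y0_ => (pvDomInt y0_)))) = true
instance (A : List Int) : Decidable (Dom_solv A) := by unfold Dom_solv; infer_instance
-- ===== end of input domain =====

-- B replaces A's nested index scan over A[:-1] with a counting dict built in one pass plus
-- a single linear scan (objective: alternative algorithm).


-- ===== PORT A =====
-- inner loop 'for j in range(i+1, ele_len-1): if A[i] == A[j]: return A[i]'
-- (all indices the loops produce are in range, so pyGet? always yields 'some')
def solvInnerA (A : List Int) (i : Int) : List Int → Option Int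
  | [] => none
  | j :: js =>
      if PySem.List.pyGet? A i = PySem.List.pyGet? A j then PySem.List.pyGet? A i
      else solvInnerA A i js

-- outer loop 'for i in range(0, ele_len-1)'; falling through returns -1
def solvOuterA (A : List Int) (eleLen : Int) : List Int → Int
  | [] => -1
  | i :: is =>
      match solvInnerA A i (PySem.List.pyRange (i + 1) (eleLen - 1) 1) with
      | some v => v
      | none => solvOuterA A eleLen is

def solv (A : List Int) : Int :=
  let eleLen : Int := A.length
  solvOuterA A eleLen (PySem.List.pyRange 0 (eleLen - 1) 1)

-- ===== PORT B =====
-- 'counts = {}; for x in body: counts[x] = counts.get(x, 0) + 1'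
def solvAltCounts (body : List Int) : PySem.Dict Int Int :=
  body.foldl (fun d x => d.insert x (d.getD x 0 + 1)) PySem.Dict.empty

-- 'for x in body: if counts[x] > 1: return x' then 'return -1'
def solvAltScan (counts : PySem.Dict Int Int) : List Int → Int
  | [] => -1
  | x :: xs => if 1 < counts.getD x 0 then x else solvAltScan counts xs

def solv_alt (A : List Int) : Int :=
  let body := PySem.List.slice A none (some (-1))
  solvAltScan (solvAltCounts body) body

-- ===== PRECONDITION & SPEC =====
def Spec_solv (A : List Int) (out : Int) : Prop := out = solv_alt A
instance (A : List Int) (out : Int) : Decidable (Spec_solv A out) := by unfold Spec_solv; infer_instance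

-- ===== CLAIM (what is proved, stated in full; the proofs are below) =====
def Claim_equal_solv : Prop := ∀ (A : List Int), Dom_solv A → Spec_solv A (solv A)

-- ===== LEMMAS AND PROOFS =====

-- common reference function: first element of l duplicated later in l, else -1
def firstDup : List Int → Int
  | [] => -1
  | x :: xs => if x ∈ xs then x else firstDup xs

lemma find?_congr_mem {α : Type} (l : List α) (p q : α → Bool)
    (h : ∀ x ∈ l, p x = q x) : l.find? p = l.find? q := by
  induction l with
  | nil => rfl
  | cons x xs ih =>
      simp only [List.find?_cons, h x (by simp)]
      cases hq : q x with
      | true => rfl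
      | false => exact ih (fun y hy => h y (by simp [hy]))

lemma firstDup_eq_find (l : List Int) :
    firstDup l = (l.find? (fun x => decide (1 < l.count x))).getD (-1) := by
  induction l with
  | nil => rfl
  | cons x xs ih =>
      by_cases hx : x ∈ xs
      · have : 1 < (x :: xs).count x := by
          have := List.count_pos_iff.mpr hx
          simp [List.count_cons_self]; omega
        simp [firstDup, hx]
      · have hcx : ¬ 1 < (x :: xs).count x := by
          have : xs.count x = 0 := List.count_eq_zero.mpr hx
          simp [List.count_cons_self, this]
        have hcong : xs.find? (fun y => decide (1 < (x :: xs).count y))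
            = xs.find? (fun y => decide (1 < xs.count y)) := by
          refine find?_congr_mem xs _ _ (fun y hy => ?_)
          have hne : x ≠ y := fun h => hx (h ▸ hy)
          simp [hne]
        simp [firstDup, hx, hcong, ih]

-- ---- A side ----

lemma solvInnerA_spec (A : List Int) (i : Int) (js : List Int) :
    solvInnerA A i js =
      if ∃ j ∈ js, PySem.List.pyGet? A i = PySem.List.pyGet? A j
      then PySem.List.pyGet? A i else none := by
  induction js with
  | nil => simp [solvInnerA]
  | cons j js ih =>
      by_cases h : PySem.List.pyGet? A i = PySem.List.pyGet? A j
      · simp [solvInnerA, h]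
      · simp [solvInnerA, h, ih]

lemma pyGet?_dropLast (A : List Int) (k : Nat) (hk : k < A.length - 1) :
    PySem.List.pyGet? A (k : Int) = some (A.dropLast[k]'(by simp [List.length_dropLast]; omega)) := by
  rw [PySem.List.pyGet?_natCast]
  rw [List.getElem?_eq_getElem (by omega)]
  congr 1
  exact (List.getElem_dropLast _).symm

lemma exists_range_iff_mem_drop (A : List Int) (k : Nat) (hk : k < A.length - 1) :
    (∃ j ∈ PySem.List.pyRange ((k : Int) + 1) ((A.length : Int) - 1) 1,
        PySem.List.pyGet? A k = PySem.List.pyGet? A j)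
      ↔ A.dropLast[k]'(by simp [List.length_dropLast]; omega) ∈ A.dropLast.drop (k + 1) := by
  constructor
  · rintro ⟨j, hj, hEq⟩
    rw [PySem.List.mem_pyRange_one] at hj
    obtain ⟨hj1, hj2⟩ := hj
    have hjn : j.toNat < A.length - 1 := by omega
    have hjc : ((j.toNat : Nat) : Int) = j := by omega
    rw [pyGet?_dropLast A k hk] at hEq
    rw [← hjc, pyGet?_dropLast A j.toNat hjn] at hEq
    have hmem : A.dropLast[j.toNat]'(by simp [List.length_dropLast]; omega)
        ∈ A.dropLast.drop (k + 1) := by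
      rw [List.mem_iff_getElem]
      refine ⟨j.toNat - (k + 1), by simp [List.length_dropLast]; omega, ?_⟩
      rw [List.getElem_drop]
      congr 1
      omega
    rw [Option.some_inj] at hEq
    exact hEq ▸ hmem
  · intro hmem
    rw [List.mem_iff_getElem] at hmem
    obtain ⟨m, hm, hEq⟩ := hmem
    have hm' : m < A.length - 1 - (k + 1) := by simpa [List.length_dropLast] using hm
    refine ⟨((k + 1 + m : Nat) : Int), ?_, ?_⟩
    · rw [PySem.List.mem_pyRange_one]; omega
    · rw [pyGet?_dropLast A k hk, pyGet?_dropLast A (k + 1 + m) (by omega)]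
      rw [List.getElem_drop] at hEq
      congr 1
      exact hEq.symm

lemma solvOuterA_spec (A : List Int) (k : Nat) (hk : k ≤ A.length - 1) (hA : A ≠ []) :
    solvOuterA A (A.length : Int) (PySem.List.pyRange (k : Int) ((A.length : Int) - 1) 1)
      = firstDup (A.dropLast.drop k) := by
  have hlen : 1 ≤ A.length := by
    cases A with
    | nil => exact absurd rfl hA
    | cons a as => simp
  induction h : A.length - 1 - k generalizing k with
  | zero =>
      have hke : k = A.length - 1 := by omega
      rw [PySem.List.pyRange_one_eq_nil (by omega)]
      rw [List.drop_eq_nil_of_le (by simp [List.length_dropLast]; omega)]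
      rfl
  | succ m ih =>
      have hklt : k < A.length - 1 := by omega
      rw [PySem.List.pyRange_one_cons (by omega)]
      show (match solvInnerA A (k : Int) (PySem.List.pyRange ((k:Int) + 1) ((A.length:Int) - 1) 1) with
        | some v => v
        | none => solvOuterA A (A.length : Int)
            (PySem.List.pyRange ((k:Int) + 1) ((A.length:Int) - 1) 1)) = _
      rw [solvInnerA_spec]
      have hdk : A.dropLast.drop k
          = A.dropLast[k]'(by simp [List.length_dropLast]; omega) :: A.dropLast.drop (k + 1) :=
        (List.getElem_cons_drop ..).symm
      by_cases hmem : A.dropLast[k]'(by simp [List.length_dropLast]; omega) ∈ A.dropLast.drop (k + 1)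
      · rw [if_pos ((exists_range_iff_mem_drop A k hklt).mpr hmem)]
        rw [pyGet?_dropLast A k hklt]
        rw [hdk]
        have hmem2 : A[k]'(by omega) ∈ A.dropLast.drop (k + 1) := by
          simpa using hmem
        simp [firstDup, hmem2]
      · rw [if_neg (fun h' => hmem ((exists_range_iff_mem_drop A k hklt).mp h'))]
        have hcast : ((k : Int) + 1) = ((k + 1 : Nat) : Int) := by push_cast; ring
        rw [hcast]
        rw [ih (k + 1) (by omega) (by omega)]
        rw [hdk]
        have hmem2 : A[k]'(by omega) ∉ A.dropLast.drop (k + 1) := by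
          simpa using hmem
        simp [firstDup, hmem2]

lemma solv_eq_firstDup (A : List Int) : solv A = firstDup A.dropLast := by
  cases A with
  | nil =>
      rfl
  | cons a as =>
      show solvOuterA (a :: as) ((a :: as).length : Int)
          (PySem.List.pyRange 0 (((a :: as).length : Int) - 1) 1) = _
      have h0 : ((0 : Nat) : Int) = 0 := rfl
      rw [← h0, solvOuterA_spec (a :: as) 0 (by omega) (by simp)]
      simp

-- ---- B side ----

lemma solvAltScan_eq_find (c : PySem.Dict Int Int) (l : List Int) :
    solvAltScan c l = (l.find? (fun x => decide (1 < c.getD x 0))).getD (-1) := by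
  induction l with
  | nil => rfl
  | cons x xs ih =>
      by_cases h : 1 < c.getD x 0
      · simp [solvAltScan, h]
      · simp [solvAltScan, h, ih]

lemma counts_getD (body : List Int) (x : Int) :
    (solvAltCounts body).getD x 0 = body.count x := by
  unfold solvAltCounts
  rw [PySem.Dict.getD_foldl_insert_add_one]
  simp [PySem.Dict.getD_empty]

lemma solv_alt_eq_firstDup (A : List Int) : solv_alt A = firstDup A.dropLast := by
  show solvAltScan (solvAltCounts (PySem.List.slice A none (some (-1))))
      (PySem.List.slice A none (some (-1))) = _
  rw [PySem.List.slice_to_neg_one]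
  rw [solvAltScan_eq_find, firstDup_eq_find]
  congr 1
  refine find?_congr_mem _ _ _ (fun y _ => ?_)
  rw [counts_getD]
  simp

-- ===== VERDICT (by name: the statement is the Claim_ definition above) =====
theorem solv_spec : Claim_equal_solv := by
  intro A _
  show solv A = solv_alt A
  rw [solv_eq_firstDup, solv_alt_eq_firstDup]
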